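-- pv_equiv track=rewrite | github.com/AbhiGadhave11/Python_Programming | Assign6_Q4.py | Zerox
-- ===== SOURCE A (Python) =====
-- def Zerox(no):
-- 	iDigit = 0;
-- 	iMulti = 1;
-- 	if(no < 0):
-- 		no = -no;
-- 	while(no>0):
-- 		iDigit = no % 10;
-- 		if(iDigit == 0):
-- 			no = int(no / 10);
-- 			continue;
-- 		iMulti = iMulti * iDigit;
-- 		no = int(no / 10);
--
-- 	return iMulti;
-- ===== SOURCE B (Python) =====
-- def Zerox(no):
--     p = 1
--     for c in str(abs(no)):
--         d = int(c)
--         if d != 0: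
--             p = p * d
--     return p
-- ===== Notes on version B (the rewrite author's own statement) =====
-- stated objective: idiomatic
-- what changed: Replaces the modular-arithmetic digit-peeling while-loop (low digit first, via % 10 and int(no/10)) with a left-to-right traversal of the decimal string str(abs(no)), multiplying each non-zero character's digit into the product.
import Mathlib
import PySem

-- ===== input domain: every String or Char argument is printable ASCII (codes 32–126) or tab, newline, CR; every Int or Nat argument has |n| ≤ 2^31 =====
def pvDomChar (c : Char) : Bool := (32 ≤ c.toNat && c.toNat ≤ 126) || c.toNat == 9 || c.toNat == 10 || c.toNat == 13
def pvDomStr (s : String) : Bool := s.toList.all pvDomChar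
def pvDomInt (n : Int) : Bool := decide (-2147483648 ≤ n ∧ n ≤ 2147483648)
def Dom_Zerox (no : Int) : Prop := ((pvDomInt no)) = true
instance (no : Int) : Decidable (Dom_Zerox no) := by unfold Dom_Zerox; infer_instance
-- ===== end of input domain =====

-- B traverses the decimal string of |no| left to right instead of A's %10 / int(no/10)
-- digit peeling; same return value, objective: idiomatic.

-- ===== PORT A =====
-- 'int(no / 10)' is ported as PySem.Int.truncdiv: exact for |no| < 2^53 (Dom gives |no| ≤ 2^31).
def ZeroxLoop (no iMulti : Int) : Int :=
  if _h : no > 0 then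
    let iDigit := PySem.Int.mod no 10
    if iDigit = 0 then ZeroxLoop (PySem.Int.truncdiv no 10) iMulti
    else ZeroxLoop (PySem.Int.truncdiv no 10) (iMulti * iDigit)
  else iMulti
termination_by no.toNat
decreasing_by
  all_goals
    simp only [PySem.Int.truncdiv, Int.tdiv_eq_ediv_of_nonneg (by omega : (0:Int) ≤ no)]
    omega

def Zerox (no : Int) : Int :=
  ZeroxLoop (if no < 0 then -no else no) 1

-- ===== PORT B =====
-- int(c) for the single decimal-digit characters of str(abs(no)) is exactly (c.toNat : Int) - 48.
def ZeroxAltStep (p : Int) (c : Char) : Int :=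
  let d : Int := (c.toNat : Int) - 48
  if d ≠ 0 then p * d else p

def Zerox_alt (no : Int) : Int :=
  (PySem.Int.toStr ((no.natAbs : Nat) : Int)).toList.foldl ZeroxAltStep 1

-- ===== PRECONDITION & SPEC =====
def Spec_Zerox (no : Int) (out : Int) : Prop := out = Zerox_alt no
instance (no : Int) (out : Int) : Decidable (Spec_Zerox no out) := by unfold Spec_Zerox; infer_instance

-- ===== CLAIM (what is proved, stated in full; the proofs are below) =====
def Claim_equal_Zerox : Prop := ∀ (no : Int), Dom_Zerox no → Spec_Zerox no (Zerox no)

-- ===== LEMMAS AND PROOFS =====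

-- Product of the non-zero decimal digits of n.
def nzProd (n : Nat) : Int :=
  if _h : n = 0 then 1
  else (if n % 10 = 0 then 1 else ((n % 10 : Nat) : Int)) * nzProd (n / 10)
decreasing_by omega

theorem zeroxLoop_eq (n : Nat) : ∀ m : Int, ZeroxLoop (n : Int) m = m * nzProd n := by
  induction n using Nat.strong_induction_on with
  | _ n ih =>
    intro m
    rw [ZeroxLoop]
    by_cases h0 : n = 0
    · subst h0; simp [nzProd]
    · have hpos : ((n : Int)) > 0 := by exact_mod_cast Nat.pos_of_ne_zero h0
      have hmod : PySem.Int.mod (n : Int) 10 = ((n % 10 : Nat) : Int) := by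
        exact_mod_cast PySem.Int.mod_natCast n 10
      have hdiv : PySem.Int.truncdiv (n : Int) 10 = ((n / 10 : Nat) : Int) := rfl
      rw [dif_pos hpos]
      simp only [hmod, hdiv]
      rw [nzProd]
      rw [dif_neg h0]
      by_cases hd : n % 10 = 0
      · rw [if_pos (by exact_mod_cast congrArg (Nat.cast : Nat → Int) hd),
            ih (n / 10) (Nat.div_lt_self (Nat.pos_of_ne_zero h0) (by omega)) m, if_pos hd]
        ring
      · rw [if_neg (by exact_mod_cast hd),
            ih (n / 10) (Nat.div_lt_self (Nat.pos_of_ne_zero h0) (by omega)) (m * _), if_neg hd]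
        ring

-- Nat.toDigitsCore: the accumulator is appended on the right.
theorem toDigitsCore_acc (fuel : Nat) : ∀ (n : Nat) (ds : List Char),
    Nat.toDigitsCore 10 fuel n ds = Nat.toDigitsCore 10 fuel n [] ++ ds := by
  induction fuel with
  | zero => intro n ds; simp [Nat.toDigitsCore]
  | succ f ih =>
    intro n ds
    simp only [Nat.toDigitsCore]
    by_cases h : n / 10 = 0
    · simp [h]
    · simp only [h]
      rw [ih (n / 10) ((n % 10).digitChar :: ds), ih (n / 10) [(n % 10).digitChar]]
      simp

-- Nat.toDigitsCore: any fuel above n gives Nat.toDigits 10 n.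
theorem toDigitsCore_fuel (n : Nat) : ∀ f : Nat, n < f →
    Nat.toDigitsCore 10 f n [] = Nat.toDigits 10 n := by
  induction n using Nat.strong_induction_on with
  | _ n ih =>
    intro f hf
    obtain ⟨f', rfl⟩ : ∃ f', f = f' + 1 := ⟨f - 1, by omega⟩
    rw [Nat.toDigits]
    simp only [Nat.toDigitsCore]
    by_cases h : n / 10 = 0
    · simp [h]
    · have hlt : n / 10 < n := Nat.div_lt_self (by omega) (by omega)
      simp only [h]
      rw [toDigitsCore_acc, toDigitsCore_acc n, ih (n / 10) hlt f' (by omega),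
          ih (n / 10) hlt n (by omega)]

-- Peel the last (lowest) digit of the decimal string.
theorem toDigits_peel (n : Nat) (h : 10 ≤ n) :
    Nat.toDigits 10 n = Nat.toDigits 10 (n / 10) ++ [(n % 10).digitChar] := by
  rw [Nat.toDigits]
  simp only [Nat.toDigitsCore]
  have h0 : ¬ n / 10 = 0 := by omega
  rw [if_neg h0]
  rw [toDigitsCore_acc, toDigitsCore_fuel (n / 10) n (by omega)]

theorem digitChar_val (r : Nat) (hr : r < 10) :
    ((r.digitChar.toNat : Nat) : Int) - 48 = (r : Int) := by
  interval_cases r <;> decide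

theorem step_digitChar (p : Int) (r : Nat) (hr : r < 10) :
    ZeroxAltStep p r.digitChar = if r = 0 then p else p * (r : Int) := by
  simp only [ZeroxAltStep, digitChar_val r hr]
  by_cases h : r = 0
  · subst h; simp
  · have hz : ((r : Int)) ≠ 0 := by exact_mod_cast h
    simp [h]

theorem foldl_toDigits (n : Nat) : ∀ m : Int,
    List.foldl ZeroxAltStep m (Nat.toDigits 10 n) = m * nzProd n := by
  induction n using Nat.strong_induction_on with
  | _ n ih =>
    intro m
    by_cases hbig : 10 ≤ n
    · rw [toDigits_peel n hbig, List.foldl_append]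
      have hlt : n / 10 < n := Nat.div_lt_self (by omega) (by omega)
      rw [ih (n / 10) hlt m]
      simp only [List.foldl_cons, List.foldl_nil]
      rw [step_digitChar _ (n % 10) (by omega)]
      conv_rhs => rw [nzProd]
      rw [dif_neg (by omega : ¬ n = 0)]
      by_cases hd : n % 10 = 0
      · rw [if_pos hd, if_pos hd]; ring
      · rw [if_neg hd, if_neg hd]; ring
    · have hsmall : Nat.toDigits 10 n = [n.digitChar] := by
        rw [Nat.toDigits]
        simp only [Nat.toDigitsCore]
        have h0 : n / 10 = 0 := by omega
        simp [h0, Nat.mod_eq_of_lt (by omega : n < 10)]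
      rw [hsmall]
      simp only [List.foldl_cons, List.foldl_nil]
      rw [step_digitChar _ n (by omega)]
      by_cases h0 : n = 0
      · subst h0; simp [nzProd]
      · rw [if_neg h0]
        conv_rhs => rw [nzProd]
        rw [dif_neg h0, Nat.mod_eq_of_lt (by omega : n < 10),
            Nat.div_eq_of_lt (by omega : n < 10), if_neg h0]
        simp [nzProd]

theorem zerox_alt_eq (no : Int) : Zerox_alt no = nzProd no.natAbs := by
  unfold Zerox_alt
  rw [PySem.Int.toList_toStr]
  have : PySem.Int.toChars ((no.natAbs : Nat) : Int) = Nat.toDigits 10 no.natAbs := by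
    simp only [PySem.Int.toChars]
    rw [if_neg (by omega), Int.toNat_natCast]
  rw [this, foldl_toDigits]
  ring

-- ===== VERDICT (by name: the statement is the Claim_ definition above) =====
theorem Zerox_spec : Claim_equal_Zerox := by
  intro no _hdom
  unfold Spec_Zerox Zerox
  have habs : (if no < 0 then -no else no) = ((no.natAbs : Nat) : Int) := by
    split <;> omega
  rw [habs, zeroxLoop_eq, zerox_alt_eq]
  ring
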